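-- pv_equiv track=rewrite | github.com/PhysicsUofRAUI/project_manager | app.py | get_user_level
-- ===== SOURCE A (Python) =====
-- XP_LEVELS = {
--     1: {"name": "Ensign", "xp": 0},
--     2: {"name": "Engineering Student", "xp": 10000},
--     3: {"name": "Physics Afficiando", "xp": 100000},
--     4: {"name": "Engineering Assistant", "xp": 1000000},
--     5: {"name": "Quantum Enthusiast", "xp": 10000000},
--     6: {"name": "Black Arts Sailer", "xp": 100000000},
--     7: {"name": "Embedded Diver", "xp": 1000000000},
--     8: {"name": "Renaissance Student", "xp": 10000000000},
--     9: {"name": "Master of the layers", "xp": 100000000000},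
--     10: {"name": "Captain of the Electrons", "xp": 1000000000000}
-- }
--
-- def get_user_level(current_xp):
--     """Determines user level based on hardcoded table."""
--     current_lvl = 1
--     current_title = XP_LEVELS[1]["name"]
--
--     for lvl, data in XP_LEVELS.items():
--         if current_xp >= data["xp"]:
--             current_lvl = lvl
--             current_title = data["name"]
--         else:
--             break
--     return current_lvl, current_title
-- ===== SOURCE B (Python) =====
-- THRESHOLDS = [0, 10000, 100000, 1000000, 10000000, 100000000,
--               1000000000, 10000000000, 100000000000, 1000000000000]
-- NAMES = ["Ensign", "Engineering Student", "Physics Afficiando",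
--          "Engineering Assistant", "Quantum Enthusiast", "Black Arts Sailer",
--          "Embedded Diver", "Renaissance Student", "Master of the layers",
--          "Captain of the Electrons"]
--
-- def get_user_level(current_xp):
--     """Determines user level by binary search over the sorted XP thresholds."""
--     lo, hi = 0, len(THRESHOLDS)
--     while lo < hi:
--         mid = (lo + hi) // 2
--         if current_xp < THRESHOLDS[mid]:
--             hi = mid
--         else:
--             lo = mid + 1
--     lvl = max(1, lo)
--     return lvl, NAMES[lvl - 1]
-- ===== Notes on version B (the rewrite author's own statement) =====
-- stated objective: idiomatic
-- what changed: Replaces A's linear scan-with-break over the XP_LEVELS dict by a hand-written bisect_right binary search over the ascending threshold list, clamping the insertion point to level >= 1.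
import Mathlib
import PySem

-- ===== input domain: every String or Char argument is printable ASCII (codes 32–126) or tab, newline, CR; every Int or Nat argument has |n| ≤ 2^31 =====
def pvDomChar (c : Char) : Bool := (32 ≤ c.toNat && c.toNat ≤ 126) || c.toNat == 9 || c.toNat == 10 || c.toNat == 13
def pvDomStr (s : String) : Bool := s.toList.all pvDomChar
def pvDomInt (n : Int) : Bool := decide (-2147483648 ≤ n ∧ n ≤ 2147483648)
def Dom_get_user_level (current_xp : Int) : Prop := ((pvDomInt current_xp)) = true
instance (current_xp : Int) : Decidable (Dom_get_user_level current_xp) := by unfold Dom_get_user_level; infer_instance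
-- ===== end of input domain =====

-- B replaces A's scan-with-break over the table by a hand-written binary search over
-- the ascending threshold list (idiomatic bisect_right + clamp); same result everywhere.

-- ===== PORT A =====
-- XP_LEVELS as an insertion-ordered association list: (lvl, (name, xp))
def xpLevels : List (Int × String × Int) :=
  [(1, "Ensign", 0), (2, "Engineering Student", 10000),
   (3, "Physics Afficiando", 100000), (4, "Engineering Assistant", 1000000),
   (5, "Quantum Enthusiast", 10000000), (6, "Black Arts Sailer", 100000000),
   (7, "Embedded Diver", 1000000000), (8, "Renaissance Student", 10000000000),
   (9, "Master of the layers", 100000000000),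
   (10, "Captain of the Electrons", 1000000000000)]

-- the 'for … break' loop: recursion over the items, carrying (current_lvl, current_title)
def getLevelLoop (current_xp : Int) : List (Int × String × Int) → Int × String → Int × String
  | [], st => st
  | (lvl, name, xp) :: rest, st =>
      if current_xp ≥ xp then getLevelLoop current_xp rest (lvl, name) else st

def get_user_level (current_xp : Int) : Int × String :=
  getLevelLoop current_xp xpLevels (1, "Ensign")

-- ===== PORT B =====
def bThresholds : List Int :=
  [0, 10000, 100000, 1000000, 10000000, 100000000,
   1000000000, 10000000000, 100000000000, 1000000000000]

def bNames : List String :=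
  ["Ensign", "Engineering Student", "Physics Afficiando",
   "Engineering Assistant", "Quantum Enthusiast", "Black Arts Sailer",
   "Embedded Diver", "Renaissance Student", "Master of the layers",
   "Captain of the Electrons"]

-- the while-loop of Source B's binary search; THRESHOLDS[mid] is always in range, so getD is exact
def bisectLoop (current_xp : Int) (lo hi : Nat) : Nat :=
  if lo < hi then
    let mid := (lo + hi) / 2
    if current_xp < bThresholds.getD mid 0 then bisectLoop current_xp lo mid
    else bisectLoop current_xp (mid + 1) hi
  else lo
termination_by hi - lo
decreasing_by all_goals omega

def get_user_level_alt (current_xp : Int) : Int × String :=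
  let lo := bisectLoop current_xp 0 bThresholds.length
  let lvl := max 1 lo
  ((lvl : Int), bNames.getD (lvl - 1) "")

-- ===== PRECONDITION & SPEC =====
def Spec_get_user_level (current_xp : Int) (out : Int × String) : Prop := out = get_user_level_alt current_xp
instance (current_xp : Int) (out : Int × String) : Decidable (Spec_get_user_level current_xp out) := by unfold Spec_get_user_level; infer_instance

-- ===== CLAIM (what is proved, stated in full; the proofs are below) =====
def Claim_equal_get_user_level : Prop := ∀ (current_xp : Int), Dom_get_user_level current_xp → Spec_get_user_level current_xp (get_user_level current_xp)

-- ===== LEMMAS AND PROOFS =====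

-- ===== VERDICT (by name: the statement is the Claim_ definition above) =====
theorem get_user_level_spec : Claim_equal_get_user_level := by
  intro x hx
  unfold Dom_get_user_level pvDomInt at hx
  simp only [decide_eq_true_eq] at hx
  unfold Spec_get_user_level get_user_level get_user_level_alt
  by_cases h0 : x < 0
  · have c0 : x < 0 := by omega
    have c1 : x < 10000 := by omega
    have c2 : x < 100000 := by omega
    have c5 : x < 100000000 := by omega
    have d0 : ¬ (0:Int) ≤ x := by omega
    simp [bisectLoop.eq_def, bThresholds, bNames, getLevelLoop, xpLevels, ge_iff_le, c0, c1, c2, c5, d0]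
  by_cases h1 : x < 10000
  · have c0 : ¬ x < 0 := by omega
    have c1 : x < 10000 := by omega
    have c2 : x < 100000 := by omega
    have c5 : x < 100000000 := by omega
    have d0 : (0:Int) ≤ x := by omega
    have d1 : ¬ (10000:Int) ≤ x := by omega
    simp [bisectLoop.eq_def, bThresholds, bNames, getLevelLoop, xpLevels, ge_iff_le, c0, c1, c2, c5, d0, d1]
  by_cases h2 : x < 100000
  · have c1 : ¬ x < 10000 := by omega
    have c2 : x < 100000 := by omega
    have c5 : x < 100000000 := by omega
    have d0 : (0:Int) ≤ x := by omega
    have d1 : (10000:Int) ≤ x := by omega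
    have d2 : ¬ (100000:Int) ≤ x := by omega
    simp [bisectLoop.eq_def, bThresholds, bNames, getLevelLoop, xpLevels, ge_iff_le, c1, c2, c5, d0, d1, d2]
  by_cases h3 : x < 1000000
  · have c2 : ¬ x < 100000 := by omega
    have c3 : x < 1000000 := by omega
    have c4 : x < 10000000 := by omega
    have c5 : x < 100000000 := by omega
    have d0 : (0:Int) ≤ x := by omega
    have d1 : (10000:Int) ≤ x := by omega
    have d2 : (100000:Int) ≤ x := by omega
    have d3 : ¬ (1000000:Int) ≤ x := by omega
    simp [bisectLoop.eq_def, bThresholds, bNames, getLevelLoop, xpLevels, ge_iff_le, c2, c3, c4, c5, d0, d1, d2, d3]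
  by_cases h4 : x < 10000000
  · have c2 : ¬ x < 100000 := by omega
    have c3 : ¬ x < 1000000 := by omega
    have c4 : x < 10000000 := by omega
    have c5 : x < 100000000 := by omega
    have d0 : (0:Int) ≤ x := by omega
    have d1 : (10000:Int) ≤ x := by omega
    have d2 : (100000:Int) ≤ x := by omega
    have d3 : (1000000:Int) ≤ x := by omega
    have d4 : ¬ (10000000:Int) ≤ x := by omega
    simp [bisectLoop.eq_def, bThresholds, bNames, getLevelLoop, xpLevels, ge_iff_le, c2, c3, c4, c5, d0, d1, d2, d3, d4]
  by_cases h5 : x < 100000000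
  · have c2 : ¬ x < 100000 := by omega
    have c4 : ¬ x < 10000000 := by omega
    have c5 : x < 100000000 := by omega
    have d0 : (0:Int) ≤ x := by omega
    have d1 : (10000:Int) ≤ x := by omega
    have d2 : (100000:Int) ≤ x := by omega
    have d3 : (1000000:Int) ≤ x := by omega
    have d4 : (10000000:Int) ≤ x := by omega
    have d5 : ¬ (100000000:Int) ≤ x := by omega
    simp [bisectLoop.eq_def, bThresholds, bNames, getLevelLoop, xpLevels, ge_iff_le, c2, c4, c5, d0, d1, d2, d3, d4, d5]
  by_cases h6 : x < 1000000000
  · have c5 : ¬ x < 100000000 := by omega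
    have c6 : x < 1000000000 := by omega
    have c7 : x < 10000000000 := by omega
    have c8 : x < 100000000000 := by omega
    have d0 : (0:Int) ≤ x := by omega
    have d1 : (10000:Int) ≤ x := by omega
    have d2 : (100000:Int) ≤ x := by omega
    have d3 : (1000000:Int) ≤ x := by omega
    have d4 : (10000000:Int) ≤ x := by omega
    have d5 : (100000000:Int) ≤ x := by omega
    have d6 : ¬ (1000000000:Int) ≤ x := by omega
    simp [bisectLoop.eq_def, bThresholds, bNames, getLevelLoop, xpLevels, ge_iff_le, c5, c6, c7, c8, d0, d1, d2, d3, d4, d5, d6]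
  -- last region inside Dom: 10^9 ≤ x ≤ 2^31 < 10^10
  have c5 : ¬ x < 100000000 := by omega
  have c6 : ¬ x < 1000000000 := by omega
  have c7 : x < 10000000000 := by omega
  have c8 : x < 100000000000 := by omega
  have d0 : (0:Int) ≤ x := by omega
  have d1 : (10000:Int) ≤ x := by omega
  have d2 : (100000:Int) ≤ x := by omega
  have d3 : (1000000:Int) ≤ x := by omega
  have d4 : (10000000:Int) ≤ x := by omega
  have d5 : (100000000:Int) ≤ x := by omega
  have d6 : (1000000000:Int) ≤ x := by omega
  have d7 : ¬ (10000000000:Int) ≤ x := by omega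
  simp [bisectLoop.eq_def, bThresholds, bNames, getLevelLoop, xpLevels, ge_iff_le, c5, c6, c7, c8, d0, d1, d2, d3, d4, d5, d6, d7]
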